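-- pv_equiv track=rewrite | github.com/vivianchen98/relationship_game | main.py | find_scores_index
-- ===== SOURCE A (Python) =====
-- def find_scores_index(pi_0_index):
--     index = 0
--     for (i,j) in pi_0_index:
--         if (i,j) == (0,0):
--             index = 0
--         elif (i,j) == (0,1):
--             index = 1
--         elif (i,j) == (1,0):
--             index = 2
--         elif (i,j) == (1,1):
--             index = 3
--
--     return index
-- ===== SOURCE B (Python) =====
-- def find_scores_index(pi_0_index):
--     for (i, j) in reversed(pi_0_index):
--         if (i, j) in ((0, 0), (0, 1), (1, 0), (1, 1)):
--             return 2 * i + j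
--     return 0
-- ===== Notes on version B (the rewrite author's own statement) =====
-- stated objective: simpler
-- what changed: B scans the list in reverse and returns 2*i+j for the first recognized pair (early exit) instead of A's forward loop that overwrites an accumulator with a four-branch if-chain.
import Mathlib
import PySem

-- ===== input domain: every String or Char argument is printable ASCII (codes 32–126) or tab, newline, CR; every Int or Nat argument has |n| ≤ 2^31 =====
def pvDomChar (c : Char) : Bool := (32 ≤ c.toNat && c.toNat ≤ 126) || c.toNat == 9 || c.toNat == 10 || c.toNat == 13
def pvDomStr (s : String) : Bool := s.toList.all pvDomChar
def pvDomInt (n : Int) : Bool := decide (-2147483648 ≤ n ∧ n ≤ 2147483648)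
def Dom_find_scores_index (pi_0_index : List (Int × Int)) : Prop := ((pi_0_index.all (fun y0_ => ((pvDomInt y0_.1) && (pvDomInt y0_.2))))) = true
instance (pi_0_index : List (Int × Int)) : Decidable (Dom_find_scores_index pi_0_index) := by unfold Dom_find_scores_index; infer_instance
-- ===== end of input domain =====

-- B scans in reverse with early exit returning 2*i+j; A overwrites an accumulator forward. Same return value, no side effects.

-- ===== PORT A =====
def find_scores_index (pi_0_index : List (Int × Int)) : Int :=
  pi_0_index.foldl (fun index p =>
    if p = (0, 0) then 0
    else if p = (0, 1) then 1
    else if p = (1, 0) then 2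
    else if p = (1, 1) then 3
    else index) 0

-- ===== PORT B =====
def find_scores_index_alt_aux : List (Int × Int) → Int
  | [] => 0
  | (i, j) :: rest =>
    if (i, j) = (0, 0) ∨ (i, j) = (0, 1) ∨ (i, j) = (1, 0) ∨ (i, j) = (1, 1) then
      2 * i + j
    else find_scores_index_alt_aux rest

def find_scores_index_alt (pi_0_index : List (Int × Int)) : Int :=
  find_scores_index_alt_aux pi_0_index.reverse

-- ===== PRECONDITION & SPEC =====
def Spec_find_scores_index (pi_0_index : List (Int × Int)) (out : Int) : Prop := out = find_scores_index_alt pi_0_index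
instance (pi_0_index : List (Int × Int)) (out : Int) : Decidable (Spec_find_scores_index pi_0_index out) := by unfold Spec_find_scores_index; infer_instance

-- ===== CLAIM (what is proved, stated in full; the proofs are below) =====
def Claim_equal_find_scores_index : Prop := ∀ (pi_0_index : List (Int × Int)), Dom_find_scores_index pi_0_index → Spec_find_scores_index pi_0_index (find_scores_index pi_0_index)

-- ===== LEMMAS AND PROOFS =====

lemma find_scores_index_eq_aux_reverse (xs : List (Int × Int)) :
    find_scores_index xs = find_scores_index_alt_aux xs.reverse := by
  induction xs using List.reverseRecOn with
  | nil => rfl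
  | append_singleton ys p ih =>
    simp only [find_scores_index, List.foldl_append, List.foldl_cons, List.foldl_nil,
      List.reverse_append, List.reverse_cons, List.reverse_nil, List.nil_append,
      List.cons_append]
    obtain ⟨i, j⟩ := p
    by_cases h00 : (i, j) = ((0 : Int), (0 : Int))
    · rw [Prod.ext_iff] at h00; obtain ⟨rfl, rfl⟩ := h00
      simp [find_scores_index_alt_aux]
    · by_cases h01 : (i, j) = ((0 : Int), (1 : Int))
      · rw [Prod.ext_iff] at h01; obtain ⟨rfl, rfl⟩ := h01
        simp [find_scores_index_alt_aux]
      · by_cases h10 : (i, j) = ((1 : Int), (0 : Int))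
        · rw [Prod.ext_iff] at h10; obtain ⟨rfl, rfl⟩ := h10
          simp [find_scores_index_alt_aux]
        · by_cases h11 : (i, j) = ((1 : Int), (1 : Int))
          · rw [Prod.ext_iff] at h11; obtain ⟨rfl, rfl⟩ := h11
            simp [find_scores_index_alt_aux]
          · have h : find_scores_index_alt_aux ((i, j) :: ys.reverse) =
                find_scores_index_alt_aux ys.reverse := by
              simp [find_scores_index_alt_aux, h00, h01, h10, h11]
            rw [h, if_neg h00, if_neg h01, if_neg h10, if_neg h11]
            simpa [find_scores_index] using ih

-- ===== VERDICT (by name: the statement is the Claim_ definition above) =====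
theorem find_scores_index_spec : Claim_equal_find_scores_index := by
  intro xs _
  unfold Spec_find_scores_index find_scores_index_alt
  exact find_scores_index_eq_aux_reverse xs
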